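-- pv_equiv track=rewrite | github.com/MetGang/Advent-of-Code | 2020/14/solution.py | get_all_x_permutations
-- ===== SOURCE A (Python) =====
-- def get_all_x_permutations(str_value):
--     indices = [ i for i, x in enumerate(str_value) if x == 'X' ]
--     ret = []
--     for i in range(2 ** len(indices)):
--         new = list(str_value)
--         for index in indices:
--             new[index] = str(i % 2)
--             i //= 2
--         ret.append(''.join(new))
--     return ret
-- ===== SOURCE B (Python) =====
-- def get_all_x_permutations(str_value):
--     results = ['']
--     seg = []
--     for ch in str_value:
--         if ch == 'X':
--             prefix = ''.join(seg)
--             seg = []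
--             results = [t + prefix + b for b in '01' for t in results]
--         else:
--             seg.append(ch)
--     tail = ''.join(seg)
--     return [t + tail for t in results]
-- ===== Notes on version B (the rewrite author's own statement) =====
-- stated objective: faster
-- what changed: Replaces A's staged algorithm (collect all X indices, count i over 2^k copies, decode i's bits and write them into a fresh char-list copy of the whole string per result) by a single forward pass with a segment buffer: non-X characters accumulate in a buffer, and each X flushes the buffer and doubles the current result list with zero/one suffixes (new bit in the outer comprehension loop, preserving A's first-X-varies-fastest order); no index list, no counter, no per-copy substitution.
import Mathlib
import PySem

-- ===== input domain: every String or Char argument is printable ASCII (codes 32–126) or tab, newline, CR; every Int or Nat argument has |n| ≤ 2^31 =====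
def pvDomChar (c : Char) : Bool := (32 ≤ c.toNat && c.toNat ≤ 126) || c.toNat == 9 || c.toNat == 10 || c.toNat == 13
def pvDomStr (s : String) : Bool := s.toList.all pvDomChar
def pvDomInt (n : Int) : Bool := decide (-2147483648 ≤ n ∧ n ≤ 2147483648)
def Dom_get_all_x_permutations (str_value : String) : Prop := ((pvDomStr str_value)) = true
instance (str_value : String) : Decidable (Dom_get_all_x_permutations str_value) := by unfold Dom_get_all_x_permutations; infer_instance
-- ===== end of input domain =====

-- B replaces A's staged algorithm (X-index list + counter + bit-decoding substitution into
-- copies) by one forward pass with a segment buffer that doubles the result list at each X.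

-- ===== PORT A =====

-- enumerate(str_value): pair positions with characters (positions are nonnegative, Nat is exact)
def pvEnum : List Char → Nat → List (Nat × Char)
  | [], _ => []
  | c :: rest, n => (n, c) :: pvEnum rest (n + 1)

-- str(i % 2) as a character: i % 2 is always 0 or 1, so the one-char string is exact
def pvDigitChar (i : Nat) : Char := if i % 2 = 1 then '1' else '0'

-- the inner `for index in indices: new[index] = str(i % 2); i //= 2` loop
-- (every index comes from enumerate, hence in range: List.set is exact here)
def pvInnerA : List Nat → Nat → List Char → List Char
  | [], _, new => new
  | idx :: rest, i, new => pvInnerA rest (i / 2) (new.set idx (pvDigitChar i))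

def get_all_x_permutations (str_value : String) : List String :=
  let indices := (pvEnum str_value.toList 0).filterMap
    (fun p => if p.2 = 'X' then some p.1 else none)
  (List.range (2 ^ indices.length)).foldl
    (fun ret i => ret ++ [String.ofList (pvInnerA indices i str_value.toList)]) []

-- ===== PORT B =====

-- one loop step on the state (results, seg): an 'X' flushes the buffered segment and doubles
-- the result list, with the new bit in the OUTER comprehension loop (so it varies slowest);
-- any other character is appended to the segment buffer. Strings are built as List Char and
-- joined by String.ofList at the end (Python B's str concatenation, exact on all inputs).
def pvStepB (st : List (List Char) × List Char) (ch : Char) : List (List Char) × List Char :=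
  if ch = 'X' then
    ((['0', '1'] : List Char).flatMap (fun b => st.1.map (fun t => t ++ st.2 ++ [b])), [])
  else (st.1, st.2 ++ [ch])

def get_all_x_permutations_alt (str_value : String) : List String :=
  let st := str_value.toList.foldl pvStepB ([[]], [])
  (st.1.map (fun t => t ++ st.2)).map String.ofList

-- ===== PRECONDITION & SPEC =====
def Spec_get_all_x_permutations (str_value : String) (out : List String) : Prop := out = get_all_x_permutations_alt str_value
instance (str_value : String) (out : List String) : Decidable (Spec_get_all_x_permutations str_value out) := by unfold Spec_get_all_x_permutations; infer_instance

-- ===== CLAIM (what is proved, stated in full; the proofs are below) =====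
def Claim_equal_get_all_x_permutations : Prop := ∀ (str_value : String), Dom_get_all_x_permutations str_value → Spec_get_all_x_permutations str_value (get_all_x_permutations str_value)

-- ===== LEMMAS AND PROOFS =====

-- A's X-index list, abbreviated
def pvXIdx (cs : List Char) : List Nat :=
  (pvEnum cs 0).filterMap (fun p => if p.2 = 'X' then some p.1 else none)

-- A's result on the list-of-chars level
def pvMList (cs : List Char) : List (List Char) :=
  (List.range (2 ^ (pvXIdx cs).length)).map (fun i => pvInnerA (pvXIdx cs) i cs)

theorem pvEnum_append (l : List Char) (c : Char) (n : Nat) :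
    pvEnum (l ++ [c]) n = pvEnum l n ++ [(n + l.length, c)] := by
  induction l generalizing n with
  | nil => simp [pvEnum]
  | cons d rest ih =>
      have h : n + 1 + rest.length = n + (rest.length + 1) := by omega
      simp only [List.cons_append, pvEnum, ih, List.length_cons, h]

theorem pvXIdx_append (l : List Char) (c : Char) :
    pvXIdx (l ++ [c]) = pvXIdx l ++ (if c = 'X' then [l.length] else []) := by
  unfold pvXIdx
  rw [pvEnum_append, List.filterMap_append]
  by_cases h : c = 'X' <;> simp [h]

theorem pvEnum_lt (l : List Char) (n : Nat) : ∀ p ∈ pvEnum l n, p.1 < n + l.length := by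
  induction l generalizing n with
  | nil => simp [pvEnum]
  | cons c rest ih =>
      intro p hp
      simp only [pvEnum, List.mem_cons] at hp
      rcases hp with h | h
      · subst h; simp only [List.length_cons]; omega
      · have := ih (n + 1) p h; simp only [List.length_cons] at *; omega

theorem pvXIdx_lt (l : List Char) : ∀ j ∈ pvXIdx l, j < l.length := by
  intro j hj
  obtain ⟨p, hp, hf⟩ := List.mem_filterMap.mp hj
  have hlt := pvEnum_lt l 0 p hp
  by_cases h : p.2 = 'X'
  · simp [h] at hf; omega
  · simp [h] at hf

theorem pvInnerA_length (idxs : List Nat) (i : Nat) (l : List Char) :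
    (pvInnerA idxs i l).length = l.length := by
  induction idxs generalizing i l with
  | nil => rfl
  | cons idx rest ih => simp [pvInnerA, ih]

-- writing only at indices inside l leaves an appended tail untouched
theorem pvInnerA_frozen (idxs : List Nat) (i : Nat) (l r : List Char)
    (h : ∀ j ∈ idxs, j < l.length) :
    pvInnerA idxs i (l ++ r) = pvInnerA idxs i l ++ r := by
  induction idxs generalizing i l with
  | nil => rfl
  | cons idx rest ih =>
      have hidx : idx < l.length := h idx (List.mem_cons_self ..)
      simp only [pvInnerA, List.set_append, if_pos hidx]
      exact ih (i / 2) _ (fun j hj => by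
        rw [List.length_set]; exact h j (List.mem_cons_of_mem _ hj))

-- the last index receives the (length idxs)-th bit of i
theorem pvInnerA_concat (idxs : List Nat) (n i : Nat) (l : List Char) :
    pvInnerA (idxs ++ [n]) i l =
      (pvInnerA idxs i l).set n (pvDigitChar (i / 2 ^ idxs.length)) := by
  induction idxs generalizing i l with
  | nil => simp [pvInnerA]
  | cons idx rest ih =>
      simp only [List.cons_append, pvInnerA, ih, List.length_cons]
      congr 2
      rw [Nat.div_div_eq_div_mul, ← pow_succ']

-- pvInnerA only reads the low (length idxs) bits of the counter
theorem pvInnerA_mod (idxs : List Nat) (i : Nat) (l : List Char) :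
    pvInnerA idxs (i % 2 ^ idxs.length) l = pvInnerA idxs i l := by
  induction idxs generalizing i l with
  | nil => rfl
  | cons idx rest ih =>
      have h1 : i % 2 ^ (rest.length + 1) % 2 = i % 2 :=
        Nat.mod_mod_of_dvd _ (dvd_pow_self 2 (Nat.succ_ne_zero rest.length))
      have h2 : i % 2 ^ (rest.length + 1) / 2 = i / 2 % 2 ^ rest.length := by
        rw [show (2:Nat) ^ (rest.length + 1) = 2 * 2 ^ rest.length by ring,
            Nat.mod_mul_right_div_self]
      calc pvInnerA (idx :: rest) (i % 2 ^ (idx :: rest).length) l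
          = pvInnerA rest (i / 2 % 2 ^ rest.length)
              (l.set idx (pvDigitChar (i % 2 ^ (rest.length + 1)))) := by
            simp only [pvInnerA, List.length_cons, h2]
        _ = pvInnerA rest (i / 2) (l.set idx (pvDigitChar i)) := by
            rw [ih]; congr 2; unfold pvDigitChar; rw [h1]
        _ = pvInnerA (idx :: rest) i l := rfl

-- appending one character to the string: a non-X is appended to every result; an X doubles
-- the result list, '0'-suffixed block first (the new, highest bit varies slowest)
theorem pvMList_X (cs : List Char) :
    pvMList (cs ++ ['X']) =
      (pvMList cs).map (fun t => t ++ ['0']) ++ (pvMList cs).map (fun t => t ++ ['1']) := by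
  unfold pvMList
  rw [pvXIdx_append, if_pos rfl]
  have hfix : ∀ i : Nat, pvInnerA (pvXIdx cs ++ [cs.length]) i (cs ++ ['X'])
      = pvInnerA (pvXIdx cs) i cs ++ [pvDigitChar (i / 2 ^ (pvXIdx cs).length)] := by
    intro i
    rw [pvInnerA_concat, pvInnerA_frozen _ _ _ _ (pvXIdx_lt cs), List.set_append,
        if_neg (by rw [pvInnerA_length]; omega)]
    simp [pvInnerA_length]
  have hlen : (pvXIdx cs ++ [cs.length]).length = (pvXIdx cs).length + 1 := by simp
  rw [hlen, show (2:Nat) ^ ((pvXIdx cs).length + 1)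
        = 2 ^ (pvXIdx cs).length + 2 ^ (pvXIdx cs).length from by ring,
      List.range_add, List.map_append]
  simp only [List.map_map]
  congr 1
  · refine List.map_congr_left (fun i hi => ?_)
    have hi' : i < 2 ^ (pvXIdx cs).length := List.mem_range.mp hi
    rw [hfix, Nat.div_eq_of_lt hi']
    rfl
  · refine List.map_congr_left (fun i hi => ?_)
    have hi' : i < 2 ^ (pvXIdx cs).length := List.mem_range.mp hi
    simp only [Function.comp]
    rw [hfix]
    have hd : (2 ^ (pvXIdx cs).length + i) / 2 ^ (pvXIdx cs).length = 1 := by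
      rw [Nat.add_comm, Nat.add_div_right _ (Nat.two_pow_pos _), Nat.div_eq_of_lt hi']
    have hm : (2 ^ (pvXIdx cs).length + i) % 2 ^ (pvXIdx cs).length = i := by
      rw [Nat.add_mod_left, Nat.mod_eq_of_lt hi']
    rw [hd, ← pvInnerA_mod (pvXIdx cs) (2 ^ (pvXIdx cs).length + i) cs, hm]
    rfl

theorem pvMList_nonX (cs : List Char) (c : Char) (h : c ≠ 'X') :
    pvMList (cs ++ [c]) = (pvMList cs).map (fun t => t ++ [c]) := by
  unfold pvMList
  rw [pvXIdx_append]
  simp only [if_neg h, List.append_nil, List.map_map]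
  refine List.map_congr_left (fun i _ => ?_)
  simp only [Function.comp]
  rw [pvInnerA_frozen _ _ _ _ (pvXIdx_lt cs)]

-- the loop invariant of B's forward pass: results, each completed by the pending segment,
-- are exactly A's substitution list for the processed prefix
theorem pvFoldB (cs : List Char) :
    ((cs.foldl pvStepB ([[]], [])).1).map
        (fun t => t ++ (cs.foldl pvStepB ([[]], [])).2) = pvMList cs := by
  induction cs using List.reverseRecOn with
  | nil => decide
  | append_singleton l c ih =>
      rw [List.foldl_concat]
      by_cases h : c = 'X'
      · subst h
        rw [pvMList_X, ← ih]
        simp only [pvStepB, reduceIte, List.flatMap_cons, List.flatMap_nil,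
          List.append_nil, List.map_append, List.map_map]
        congr 1
        all_goals exact List.map_congr_left (fun t _ => by simp)
      · rw [pvMList_nonX _ _ h, ← ih]
        simp only [pvStepB, if_neg h, List.map_map]
        exact List.map_congr_left (fun t _ => by simp)

theorem pvA_eq (s : String) :
    get_all_x_permutations s = (pvMList s.toList).map String.ofList := by
  unfold get_all_x_permutations pvMList
  rw [PySem.List.foldl_append_singleton_eq_map, ← pvXIdx, List.map_map, List.nil_append]
  rfl

theorem pvB_eq (s : String) :
    get_all_x_permutations_alt s = (pvMList s.toList).map String.ofList := by
  show ((s.toList.foldl pvStepB ([[]], [])).1.map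
      (fun t => t ++ (s.toList.foldl pvStepB ([[]], [])).2)).map String.ofList = _
  rw [pvFoldB]

-- ===== VERDICT (by name: the statement is the Claim_ definition above) =====
theorem get_all_x_permutations_spec : Claim_equal_get_all_x_permutations := by
  intro s _
  unfold Spec_get_all_x_permutations
  rw [pvA_eq, pvB_eq]
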